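-- pv_equiv track=rewrite | github.com/ckoons/BubbleSpacetimeTheory | play/toy_318_dmin_width_bridge.py | compute_backbone
-- ===== SOURCE A (Python) =====
-- def compute_backbone(solutions, n):
--     backbone = set()
--     values = {}
--     for v in range(n):
--         vals = set(s[v] for s in solutions)
--         if len(vals) == 1:
--             backbone.add(v)
--             values[v] = vals.pop()
--     return backbone, values
-- ===== SOURCE B (Python) =====
-- def compute_backbone(solutions, n):
--     if not solutions:
--         return set(), {}
--     first = solutions[0]
--     values = {v: first[v] for v in range(n)}
--     for s in solutions[1:]:
--         for v in range(n):
--             if v in values and s[v] != values[v]: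
--                 del values[v]
--     return set(values), values
-- ===== Notes on version B (the rewrite author's own statement) =====
-- stated objective: alternative
-- what changed: A builds a fresh set of the v-th values over all solutions for each variable; B seeds candidate values from the first solution once and deletes any candidate a later solution contradicts, returning the survivors.
import Mathlib
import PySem

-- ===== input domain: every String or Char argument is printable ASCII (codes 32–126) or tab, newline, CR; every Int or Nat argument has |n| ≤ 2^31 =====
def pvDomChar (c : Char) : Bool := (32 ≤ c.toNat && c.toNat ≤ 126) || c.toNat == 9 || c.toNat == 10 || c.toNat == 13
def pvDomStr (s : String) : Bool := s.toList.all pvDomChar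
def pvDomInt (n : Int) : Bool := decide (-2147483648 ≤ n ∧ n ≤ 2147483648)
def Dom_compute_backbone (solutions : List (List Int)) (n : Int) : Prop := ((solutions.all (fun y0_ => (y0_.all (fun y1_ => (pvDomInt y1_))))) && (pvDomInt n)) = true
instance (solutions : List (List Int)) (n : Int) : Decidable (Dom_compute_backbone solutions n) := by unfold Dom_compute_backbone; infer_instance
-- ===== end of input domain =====

-- B replaces A's per-variable set construction over all solutions by seeding candidate values from the
-- first solution and deleting candidates that any later solution contradicts (objective: alternative decomposition).

-- ===== PORT A =====
-- s[v]: exact inside Pre_ (index in range); Python raises IndexError out of range — excluded by Pre_.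
def pvGet (s : List Int) (v : Int) : Int := (PySem.List.pyGet? s v).getD 0

def compute_backbone (solutions : List (List Int)) (n : Int) : List Int × (List (Int × Int)) :=
  let res := (PySem.List.pyRange 0 n 1).foldl
    (fun (st : PySem.Set Int × PySem.Dict Int Int) v =>
      let vals : PySem.Set Int := PySem.Set.ofList (solutions.map (fun s => pvGet s v))
      if vals.length == 1 then
        -- vals.pop() on the branch-guarded 1-element set is its unique element
        (PySem.Set.add st.1 v, st.2.insert v (vals.headD 0))
      else st)
    (PySem.Set.empty, PySem.Dict.empty)
  (res.1, res.2.items)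

-- ===== PORT B =====
def compute_backbone_alt (solutions : List (List Int)) (n : Int) : List Int × (List (Int × Int)) :=
  match solutions with
  | [] => ([], [])
  | first :: rest =>
    let values0 : PySem.Dict Int Int :=
      (PySem.List.pyRange 0 n 1).foldl (fun d v => d.insert v (pvGet first v)) PySem.Dict.empty
    let values := rest.foldl (fun d s =>
      (PySem.List.pyRange 0 n 1).foldl (fun d v =>
        if d.contains v && (pvGet s v != d.getD v 0) then d.erase v else d) d) values0
    (PySem.Set.ofList values.keys, values.items)

-- ===== PRECONDITION & SPEC =====
-- Pre_ excludes exactly the inputs on which Python A raises IndexError: some solution shorter than n.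
def Pre_compute_backbone (solutions : List (List Int)) (n : Int) : Prop :=
  ∀ s ∈ solutions, n ≤ (s.length : Int)
instance (solutions : List (List Int)) (n : Int) : Decidable (Pre_compute_backbone solutions n) := by
  unfold Pre_compute_backbone; infer_instance

def pvWitness_compute_backbone : List (List Int) × Int := ([[1, 2], [1, 3]], 2)

def Spec_compute_backbone (solutions : List (List Int)) (n : Int) (out : List Int × (List (Int × Int))) : Prop := out = compute_backbone_alt solutions n
instance (solutions : List (List Int)) (n : Int) (out : List Int × (List (Int × Int))) : Decidable (Spec_compute_backbone solutions n out) := by unfold Spec_compute_backbone; infer_instance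

-- ===== CLAIM (what is proved, stated in full; the proofs are below) =====
def Claim_equal_compute_backbone : Prop := ∀ (solutions : List (List Int)) (n : Int), Dom_compute_backbone solutions n → Pre_compute_backbone solutions n → Spec_compute_backbone solutions n (compute_backbone solutions n)

-- ===== LEMMAS AND PROOFS =====

-- folding Set.add over fresh distinct elements appends them
lemma pv_foldl_add_fresh (l : List Int) : ∀ b : List Int, l.Nodup → (∀ v ∈ l, v ∉ b) →
    l.foldl PySem.Set.add b = b ++ l := by
  induction l with
  | nil => simp
  | cons x t ih =>
    intro b hnd hb
    have hx : x ∉ b := hb x (by simp)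
    have hadd : PySem.Set.add b x = b ++ [x] := by
      simp [PySem.Set.add, PySem.Set.contains, hx]
    rw [List.foldl_cons, hadd, ih (b ++ [x]) hnd.of_cons]
    · simp
    · intro v hv
      simp only [List.mem_append, List.mem_singleton]
      rintro (h | rfl)
      · exact hb v (by simp [hv]) h
      · exact (List.nodup_cons.mp hnd).1 hv

lemma pv_foldl_add_if (c : Int → Bool) (l b : List Int) (hnd : l.Nodup) (hb : ∀ v ∈ l, v ∉ b) :
    l.foldl (fun acc v => if c v then PySem.Set.add acc v else acc) b = b ++ l.filter c := by
  rw [PySem.List.foldl_if_eq_foldl_filter]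
  exact pv_foldl_add_fresh (l.filter c) b (hnd.filter c) (fun v hv => hb v (List.mem_of_mem_filter hv))

lemma pv_ofList_nodup (l : List Int) (h : l.Nodup) : PySem.Set.ofList l = l := by
  have := pv_foldl_add_fresh l [] h (by simp)
  simpa [PySem.Set.ofList, PySem.Set.empty] using this

lemma pv_ofList_cons_all (a : Int) (l : List Int) (h : l.all (fun x => x == a) = true) :
    PySem.Set.ofList (a :: l) = [a] := by
  have h' : ∀ x ∈ l, x = a := by simpa using h
  have base : PySem.Set.ofList (a :: l) = l.foldl PySem.Set.add [a] := by
    simp [PySem.Set.ofList, PySem.Set.empty, PySem.Set.add, PySem.Set.contains]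
  rw [base]
  clear base h
  induction l with
  | nil => simp
  | cons x t ih =>
    have hxa : x = a := h' x (by simp)
    subst hxa
    have hself : PySem.Set.add [x] x = [x] := by simp [PySem.Set.add, PySem.Set.contains]
    rw [List.foldl_cons, hself, ih (fun y hy => h' y (by simp [hy]))]

-- set(g(s) for s in first::rest) has one element iff every later solution agrees with the first
lemma pv_setLen_cons (a : Int) (l : List Int) :
    ((PySem.Set.ofList (a :: l)).length == 1) = l.all (fun x => x == a) := by
  cases hall : l.all (fun x => x == a) with
  | true => rw [pv_ofList_cons_all a l hall]; rfl
  | false =>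
    simp only [List.all_eq_false] at hall
    obtain ⟨x, hx, hxa⟩ := hall
    have hxa' : x ≠ a := by simpa using hxa
    have hmem_a : a ∈ PySem.Set.ofList (a :: l) := by
      rw [PySem.Set.mem_ofList]; simp
    have hmem_x : x ∈ PySem.Set.ofList (a :: l) := by
      rw [PySem.Set.mem_ofList]; simp [hx]
    apply beq_eq_false_iff_ne.mpr
    intro hlen
    obtain ⟨y, hy⟩ := List.length_eq_one_iff.mp hlen
    rw [hy] at hmem_a hmem_x
    simp at hmem_a hmem_x
    exact hxa' (hmem_x.trans hmem_a.symm)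

-- characterisation of port A on a nonempty solution list
lemma pv_A_char (first : List Int) (rest : List (List Int)) (n : Int) :
    compute_backbone (first :: rest) n =
      ((PySem.List.pyRange 0 n 1).filter (fun v => rest.all (fun s => pvGet s v == pvGet first v)),
       ((PySem.List.pyRange 0 n 1).filter (fun v => rest.all (fun s => pvGet s v == pvGet first v))).map
         (fun v => (v, pvGet first v))) := by
  set c : Int → Bool := fun v => rest.all (fun s => pvGet s v == pvGet first v) with hc
  have key : (fun (st : PySem.Set Int × PySem.Dict Int Int) v =>
      let vals : PySem.Set Int := PySem.Set.ofList ((first :: rest).map (fun s => pvGet s v))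
      if vals.length == 1 then (PySem.Set.add st.1 v, st.2.insert v (vals.headD 0)) else st)
      = (fun (st : PySem.Set Int × PySem.Dict Int Int) v =>
          (if c v then PySem.Set.add st.1 v else st.1,
           if c v then st.2.insert v (pvGet first v) else st.2)) := by
    funext st v
    show (if (PySem.Set.ofList (pvGet first v :: rest.map (fun s => pvGet s v))).length == 1
        then (PySem.Set.add st.1 v, st.2.insert v ((PySem.Set.ofList (pvGet first v :: rest.map (fun s => pvGet s v))).headD 0))
        else st) = _
    have hcv : ((PySem.Set.ofList (pvGet first v :: rest.map (fun s => pvGet s v))).length == 1) = c v := by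
      rw [pv_setLen_cons, List.all_map, hc]
      rfl
    rw [hcv]
    cases h : c v with
    | false => simp
    | true =>
      have hall : (rest.map (fun s => pvGet s v)).all (fun x => x == pvGet first v) = true := by
        rw [List.all_map]; exact h
      rw [pv_ofList_cons_all _ _ hall]
      simp
  unfold compute_backbone
  rw [key]
  rw [PySem.List.foldl_prod_mk (f := fun b v => if c v then PySem.Set.add b v else b)
      (g := fun (d : PySem.Dict Int Int) v => if c v then d.insert v (pvGet first v) else d)]
  have h1 : (PySem.List.pyRange 0 n 1).foldl (fun b v => if c v then PySem.Set.add b v else b) PySem.Set.empty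
      = (PySem.List.pyRange 0 n 1).filter c := by
    have := pv_foldl_add_if c (PySem.List.pyRange 0 n 1) [] (PySem.List.nodup_pyRange_one 0 n) (by simp)
    simpa [PySem.Set.empty] using this
  have h2 : ((PySem.List.pyRange 0 n 1).foldl (fun (d : PySem.Dict Int Int) v => if c v then d.insert v (pvGet first v) else d) PySem.Dict.empty).items
      = ((PySem.List.pyRange 0 n 1).filter c).map (fun v => (v, pvGet first v)) := by
    rw [PySem.List.foldl_if_eq_foldl_filter]
    have hfresh : ∀ a ∈ (PySem.List.pyRange 0 n 1).filter c, (PySem.Dict.empty : PySem.Dict Int Int).contains ((fun x : Int => x) a) = false := by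
      intro a _; simp [PySem.Dict.contains, PySem.Dict.empty]
    have hnd : (((PySem.List.pyRange 0 n 1).filter c).map (fun x : Int => x)).Nodup := by
      simpa using (PySem.List.nodup_pyRange_one 0 n).filter c
    have hit := PySem.Dict.items_foldl_insert_fresh ((PySem.List.pyRange 0 n 1).filter c)
      (fun x : Int => x) (fun x => pvGet first x) PySem.Dict.empty hfresh hnd
    simpa [PySem.Dict.empty] using hit
  simp only [h1, h2]

-- one pass of B's deletion loop filters the dict by agreement with solution s
lemma pv_inner_items (s : List Int) (L : List Int) : ∀ d : PySem.Dict Int Int,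
    L.Nodup → d.keys.Nodup →
    (L.foldl (fun d v => if d.contains v && (pvGet s v != d.getD v 0) then d.erase v else d) d).items
      = d.items.filter (fun p => !(decide (p.1 ∈ L)) || (pvGet s p.1 == p.2)) := by
  induction L with
  | nil => intro d _ _; simp
  | cons v L' ih =>
    intro d hL hd
    have hvL' : v ∉ L' := (List.nodup_cons.mp hL).1
    have hL' : L'.Nodup := (List.nodup_cons.mp hL).2
    rw [List.foldl_cons]
    by_cases hcon : d.contains v = true
    · by_cases hne : (pvGet s v != d.getD v 0) = true
      · -- key present, value disagrees: erase v
        have hstep : (if d.contains v && (pvGet s v != d.getD v 0) then d.erase v else d) = d.erase v := by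
          rw [hcon, hne]; rfl
        rw [hstep]
        have herase_items : (d.erase v).items = d.items.filter (fun p => !(p.1 == v)) := rfl
        have hkeys : (d.erase v).keys.Nodup := by
          have hsub : (d.erase v).keys.Sublist d.keys := by
            simp only [PySem.Dict.keys, herase_items]
            exact List.Sublist.map _ List.filter_sublist
          exact hd.sublist hsub
        rw [ih (d.erase v) hL' hkeys, herase_items, List.filter_filter]
        apply List.filter_congr
        intro p hp
        by_cases hpv : p.1 = v
        · have hval : d.getD p.1 0 = p.2 :=
            PySem.Dict.getD_of_mem_items d (by exact hp) hd 0
          subst hpv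
          have hfalse : (pvGet s p.1 == p.2) = false := by
            rw [← hval]; simpa using hne
          simp [hfalse]
        · simp [hpv, List.mem_cons]
      · -- key present, value agrees: no change
        have hne' : (pvGet s v == d.getD v 0) = true := by
          simpa using hne
        have hstep : (if d.contains v && (pvGet s v != d.getD v 0) then d.erase v else d) = d := by
          simp at hne; simp [hne]
        rw [hstep, ih d hL' hd]
        apply List.filter_congr
        intro p hp
        by_cases hpv : p.1 = v
        · have hval : d.getD p.1 0 = p.2 :=
            PySem.Dict.getD_of_mem_items d (by exact hp) hd 0
          have htrue : (pvGet s p.1 == p.2) = true := by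
            rw [← hval, hpv]; exact hne'
          simp [htrue]
        · simp [hpv, List.mem_cons]
    · -- v not a key: no change
      have hconf : d.contains v = false := by simpa using hcon
      have hstep : (if d.contains v && (pvGet s v != d.getD v 0) then d.erase v else d) = d := by
        simp [hconf]
      rw [hstep, ih d hL' hd]
      apply List.filter_congr
      intro p hp
      have hpkeys : p.1 ∈ d.keys := by
        simp only [PySem.Dict.keys]; exact List.mem_map_of_mem hp
      have hpv : p.1 ≠ v := by
        intro h
        rw [PySem.Dict.contains_eq_decide_mem_keys] at hconf
        simp at hconf
        exact hconf (h ▸ hpkeys)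
      simp [hpv, List.mem_cons]

-- B's outer loop keeps exactly the candidates every later solution agrees on
lemma pv_outer (first : List Int) (n : Int) (rest : List (List Int)) :
    ∀ M : List Int, M.Nodup → (∀ v ∈ M, v ∈ PySem.List.pyRange 0 n 1) →
    (rest.foldl (fun d s => (PySem.List.pyRange 0 n 1).foldl
        (fun d v => if d.contains v && (pvGet s v != d.getD v 0) then d.erase v else d) d)
      (PySem.Dict.mk (M.map (fun v => (v, pvGet first v))))).items
    = (M.filter (fun v => rest.all (fun s => pvGet s v == pvGet first v))).map
        (fun v => (v, pvGet first v)) := by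
  induction rest with
  | nil =>
    intro M _ _
    simp
  | cons s rest' ih =>
    intro M hM hMR
    have hkeys : (PySem.Dict.mk (M.map (fun v => (v, pvGet first v)))).keys.Nodup := by
      simp only [PySem.Dict.keys, List.map_map]
      simp only [Function.comp_def]
      simpa using hM
    have h1 := pv_inner_items s (PySem.List.pyRange 0 n 1)
      (PySem.Dict.mk (M.map (fun v => (v, pvGet first v))))
      (PySem.List.nodup_pyRange_one 0 n) hkeys
    have h2 : (PySem.Dict.mk (M.map (fun v => (v, pvGet first v)))).items.filter
        (fun p => !(decide (p.1 ∈ PySem.List.pyRange 0 n 1)) || (pvGet s p.1 == p.2))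
        = (M.filter (fun v => pvGet s v == pvGet first v)).map (fun v => (v, pvGet first v)) := by
      show (M.map (fun v => (v, pvGet first v))).filter _ = _
      rw [List.filter_map]
      congr 1
      apply List.filter_congr
      intro v hv
      simp [Function.comp, hMR v hv]
    have hd1 : (PySem.List.pyRange 0 n 1).foldl
        (fun d v => if d.contains v && (pvGet s v != d.getD v 0) then d.erase v else d)
        (PySem.Dict.mk (M.map (fun v => (v, pvGet first v))))
        = PySem.Dict.mk ((M.filter (fun v => pvGet s v == pvGet first v)).map (fun v => (v, pvGet first v))) := by
      apply PySem.Dict.ext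
      rw [h1, h2]
    rw [List.foldl_cons, hd1,
      ih (M.filter (fun v => pvGet s v == pvGet first v)) (hM.filter _)
        (fun v hv => hMR v (List.mem_of_mem_filter hv)),
      List.filter_filter]
    congr 1
    apply List.filter_congr
    intro v _
    simp [List.all_cons, Bool.and_comm]

-- characterisation of port B on a nonempty solution list
lemma pv_B_char (first : List Int) (rest : List (List Int)) (n : Int) :
    compute_backbone_alt (first :: rest) n =
      ((PySem.List.pyRange 0 n 1).filter (fun v => rest.all (fun s => pvGet s v == pvGet first v)),
       ((PySem.List.pyRange 0 n 1).filter (fun v => rest.all (fun s => pvGet s v == pvGet first v))).map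
         (fun v => (v, pvGet first v))) := by
  have hvalues0 : (PySem.List.pyRange 0 n 1).foldl
      (fun (d : PySem.Dict Int Int) v => d.insert v (pvGet first v)) PySem.Dict.empty
      = PySem.Dict.mk ((PySem.List.pyRange 0 n 1).map (fun v => (v, pvGet first v))) := by
    apply PySem.Dict.ext
    have hfresh : ∀ a ∈ PySem.List.pyRange 0 n 1, (PySem.Dict.empty : PySem.Dict Int Int).contains ((fun x : Int => x) a) = false := by
      intro a _; simp [PySem.Dict.contains, PySem.Dict.empty]
    have hnd : ((PySem.List.pyRange 0 n 1).map (fun x : Int => x)).Nodup := by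
      simpa using PySem.List.nodup_pyRange_one 0 n
    have hit := PySem.Dict.items_foldl_insert_fresh (PySem.List.pyRange 0 n 1)
      (fun x : Int => x) (fun x => pvGet first x) PySem.Dict.empty hfresh hnd
    simpa [PySem.Dict.empty] using hit
  have houter := pv_outer first n rest (PySem.List.pyRange 0 n 1)
    (PySem.List.nodup_pyRange_one 0 n) (fun v hv => hv)
  show (PySem.Set.ofList _, _) = _
  rw [hvalues0]
  have hdict := PySem.Dict.ext houter
  rw [hdict]
  have hMfnd : ((PySem.List.pyRange 0 n 1).filter
      (fun v => rest.all (fun s => pvGet s v == pvGet first v))).Nodup :=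
    (PySem.List.nodup_pyRange_one 0 n).filter _
  have hkeys : (PySem.Dict.mk (((PySem.List.pyRange 0 n 1).filter
          (fun v => rest.all (fun s => pvGet s v == pvGet first v))).map
        (fun v => (v, pvGet first v)))).keys
      = (PySem.List.pyRange 0 n 1).filter (fun v => rest.all (fun s => pvGet s v == pvGet first v)) := by
    simp only [PySem.Dict.keys, List.map_map]
    simp only [Function.comp_def]
    simp
  rw [hkeys, pv_ofList_nodup _ hMfnd]

lemma pv_A_nil (n : Int) : compute_backbone [] n = ([], []) := by
  unfold compute_backbone
  simp [PySem.Set.ofList, PySem.Set.empty, PySem.Dict.empty]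

-- ===== VERDICT (by name: the statement is the Claim_ definition above) =====
theorem compute_backbone_spec : Claim_equal_compute_backbone := by
  intro solutions n _hdom _hpre
  unfold Spec_compute_backbone
  cases solutions with
  | nil => rw [pv_A_nil]; rfl
  | cons first rest => rw [pv_A_char, pv_B_char]
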